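-- pv_equiv track=rewrite | github.com/chrisaguilar/daily-programmer | easy/326-2017-08-07.py | easy_326
-- ===== SOURCE A (Python) =====
-- def is_prime(n):
--     if n <= 1:
--         return False
--     elif n <= 3:
--         return True
--     elif n % 2 == 0 or n % 3 == 0:
--         return False
--     i = 5
--     while i * i <= n:
--         if n % i == 0 or n % (i + 2) == 0:
--             return False
--         i += 6
--     return True
--
-- def easy_326(x):
--     if is_prime(x):
--         return f'{x} is prime.'
--
--     next_below = x - 1
--     next_above = x + 1
--
--     while not is_prime(next_below) or not is_prime(next_above):
--         if not is_prime(next_below):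
--             next_below -= 1
--         if not is_prime(next_above):
--             next_above += 1
--
--     return f'{next_below} < {x} < {next_above}'
-- ===== SOURCE B (Python) =====
-- def easy_326(x):
--     # Windowed sieve of Eratosthenes: sieve a doubling window around x and read
--     # the bracketing primes straight out of it (no per-candidate trial division).
--     w = 2
--     while True:
--         lo = max(2, x - w)
--         hi = x + w
--         comp = set()
--         d = 2
--         while d * d <= hi:
--             m = max(d * d, lo + (-lo) % d)
--             while m <= hi:
--                 comp.add(m)
--                 m += d
--             d += 1
--         if x >= 2 and x not in comp:
--             return f'{x} is prime.'
--         below = next((n for n in range(x - 1, lo - 1, -1) if n not in comp), None)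
--         above = next((n for n in range(x + 1, hi + 1) if n not in comp), None)
--         if below is not None and above is not None:
--             return f'{below} < {x} < {above}'
--         w *= 2
-- ===== Notes on version B (the rewrite author's own statement) =====
-- stated objective: alternative
-- what changed: Replaces per-candidate 6k±1 trial division plus an interleaved two-pointer scan by a windowed sieve of Eratosthenes: a doubling window [max(2,x-w), x+w] is sieved by marking multiples into a composite set, and the bracketing primes (or x's primality) are read directly out of the sieve.
import Mathlib
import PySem

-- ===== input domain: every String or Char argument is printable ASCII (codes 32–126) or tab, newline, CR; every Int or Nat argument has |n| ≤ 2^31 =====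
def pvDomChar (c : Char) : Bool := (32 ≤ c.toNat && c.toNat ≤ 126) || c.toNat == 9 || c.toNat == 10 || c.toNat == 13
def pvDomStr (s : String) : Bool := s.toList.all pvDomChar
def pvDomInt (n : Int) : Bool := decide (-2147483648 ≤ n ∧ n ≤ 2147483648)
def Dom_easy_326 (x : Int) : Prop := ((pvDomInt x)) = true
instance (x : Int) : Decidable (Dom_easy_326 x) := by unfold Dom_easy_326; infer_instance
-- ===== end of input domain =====

-- B replaces A's per-candidate 6k±1 trial division with interleaved two-pointer scan by a
-- windowed sieve of Eratosthenes over a doubling window around x; objective: alternative.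
-- Loops are ported with a fuel argument that only makes them total: on every input admitted
-- by Pre_ the fuel is proved sufficient; for x ≤ 1 both Pythons loop forever (excluded by Pre_).

-- ===== PORT A =====
def primeLoop : Nat → Int → Int → Bool
  | 0, _, _ => true
  | f+1, n, i =>
    if i * i ≤ n then
      if PySem.Int.mod n i = 0 ∨ PySem.Int.mod n (i + 2) = 0 then false
      else primeLoop f n (i + 6)
    else true

def isPrime (n : Int) : Bool :=
  if n ≤ 1 then false
  else if n ≤ 3 then true
  else if PySem.Int.mod n 2 = 0 ∨ PySem.Int.mod n 3 = 0 then false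
  else primeLoop (n.toNat + 1) n 5

-- A's interleaved while loop, advancing both candidates in one pass
def loopA : Nat → Int → Int → Int × Int
  | 0, b, a => (b, a)
  | f+1, b, a =>
    if isPrime b = false ∨ isPrime a = false then
      loopA f (if isPrime b = false then b - 1 else b) (if isPrime a = false then a + 1 else a)
    else (b, a)

def easy_326 (x : Int) : String :=
  if isPrime x then PySem.Int.toStr x ++ " is prime."
  else
    let p := loopA (2 * x.toNat + 8) (x - 1) (x + 1)
    PySem.Int.toStr p.1 ++ " < " ++ PySem.Int.toStr x ++ " < " ++ PySem.Int.toStr p.2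

-- ===== PORT B =====
-- inner marking loop: while m <= hi: comp.add(m); m += d
def markLoop : Nat → PySem.Set Int → Int → Int → Int → PySem.Set Int
  | 0, comp, _, _, _ => comp
  | f+1, comp, m, hi, d =>
    if m ≤ hi then markLoop f (PySem.Set.add comp m) (m + d) hi d else comp

-- outer sieve loop: d = 2; while d*d <= hi: mark multiples of d starting at max(d*d, lo + (-lo)%d)
def sieveLoop : Nat → PySem.Set Int → Int → Int → Int → PySem.Set Int
  | 0, comp, _, _, _ => comp
  | f+1, comp, d, lo, hi =>
    if d * d ≤ hi then
      sieveLoop f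
        (markLoop ((hi - d * d).toNat + 2) comp (max (d * d) (lo + PySem.Int.mod (-lo) d)) hi d)
        (d + 1) lo hi
    else comp

-- the outer `while True` window loop of Source B (w doubles each round)
def windowLoop : Nat → Int → Int → String
  | 0, _, _ => ""
  | f+1, x, w =>
    let lo := max 2 (x - w)
    let hi := x + w
    let comp := sieveLoop (hi.toNat + 1) PySem.Set.empty 2 lo hi
    if 2 ≤ x ∧ PySem.Set.contains comp x = false then
      PySem.Int.toStr x ++ " is prime."
    else
      match (PySem.List.pyRange (x - 1) (lo - 1) (-1)).find? (fun n => !PySem.Set.contains comp n),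
            (PySem.List.pyRange (x + 1) (hi + 1) 1).find? (fun n => !PySem.Set.contains comp n) with
      | some b, some a =>
          PySem.Int.toStr b ++ " < " ++ PySem.Int.toStr x ++ " < " ++ PySem.Int.toStr a
      | _, _ => windowLoop f x (w * 2)

def easy_326_alt (x : Int) : String := windowLoop 64 x 2

-- ===== PRECONDITION & SPEC =====
-- A's bracketing while loop never terminates for x ≤ 1 (the Python loops forever, returning
-- nothing); Pre_ excludes exactly those inputs.
def Pre_easy_326 (x : Int) : Prop := 2 ≤ x
instance (x : Int) : Decidable (Pre_easy_326 x) := by unfold Pre_easy_326; infer_instance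
def pvWitness_easy_326 : Int := 7

def Spec_easy_326 (x : Int) (out : String) : Prop := out = easy_326_alt x
instance (x : Int) (out : String) : Decidable (Spec_easy_326 x out) := by unfold Spec_easy_326; infer_instance

-- ===== CLAIM (what is proved, stated in full; the proofs are below) =====
def Claim_equal_easy_326 : Prop := ∀ (x : Int), Dom_easy_326 x → Pre_easy_326 x → Spec_easy_326 x (easy_326 x)

-- ===== LEMMAS AND PROOFS =====

theorem bool_false_of_not_true {b : Bool} (h : ¬ b = true) : b = false := by
  cases b
  · rfl
  · exact absurd rfl h

theorem dvd_toNat_iff {e n : Int} (he : 0 ≤ e) (hn : 0 ≤ n) :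
    e ∣ n ↔ e.toNat ∣ n.toNat := by
  rw [← Int.natCast_dvd_natCast, Int.toNat_of_nonneg he, Int.toNat_of_nonneg hn]

theorem primeLoop_false_iff (f : Nat) (n : Int) : ∀ i : Int, 5 ≤ i →
    (primeLoop f n i = false ↔
      ∃ j : Nat, j < f ∧ (i + 6*j) * (i + 6*j) ≤ n ∧ ((i + 6*j) ∣ n ∨ (i + 6*j + 2) ∣ n)) := by
  induction f with
  | zero => intro i _; simp [primeLoop]
  | succ f ih =>
    intro i h5
    by_cases hsq : i * i ≤ n
    · by_cases hdv : PySem.Int.mod n i = 0 ∨ PySem.Int.mod n (i + 2) = 0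
      · have hloop : primeLoop (f+1) n i = false := by simp [primeLoop, hsq, hdv]
        rw [hloop]
        constructor
        · intro _
          refine ⟨0, by omega, by simpa using hsq, ?_⟩
          rcases hdv with h | h
          · exact Or.inl (by simpa using (PySem.Int.mod_eq_zero_iff_dvd n i).mp h)
          · exact Or.inr (by simpa using (PySem.Int.mod_eq_zero_iff_dvd n (i+2)).mp h)
        · intro _; rfl
      · have hloop : primeLoop (f+1) n i = primeLoop f n (i + 6) := by
          simp [primeLoop, hsq, hdv]
        rw [hloop, ih (i + 6) (by omega)]
        constructor
        · rintro ⟨j, hj, h1, h2⟩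
          have e : i + 6 * ((j + 1 : Nat) : Int) = (i + 6) + 6 * (j : Int) := by push_cast; ring
          refine ⟨j + 1, by omega, ?_, ?_⟩
          · rw [e]; exact h1
          · rw [e]; exact h2
        · rintro ⟨j, hj, h1, h2⟩
          cases j with
          | zero =>
            exfalso
            simp only [Nat.cast_zero, mul_zero, add_zero] at h1 h2
            rcases h2 with h | h
            · exact hdv (Or.inl ((PySem.Int.mod_eq_zero_iff_dvd n i).mpr h))
            · exact hdv (Or.inr ((PySem.Int.mod_eq_zero_iff_dvd n (i+2)).mpr h))
          | succ j =>
            have e : i + 6 * ((j + 1 : Nat) : Int) = (i + 6) + 6 * (j : Int) := by push_cast; ring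
            refine ⟨j, by omega, ?_, ?_⟩
            · rw [← e]; exact h1
            · rw [← e]; exact h2
    · have hloop : primeLoop (f+1) n i = true := by simp [primeLoop, hsq]
      rw [hloop]
      constructor
      · intro h; exact absurd h (by decide)
      · rintro ⟨j, hj, h1, h2⟩
        exfalso
        have hj0 : (0:Int) ≤ (j : Int) := Int.natCast_nonneg j
        have hmono : i * i ≤ (i + 6 * j) * (i + 6 * j) := by nlinarith
        exact hsq (by linarith)

theorem isPrime_iff (n : Int) : isPrime n = true ↔ 2 ≤ n ∧ Nat.Prime n.toNat := by
  unfold isPrime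
  by_cases h1 : n ≤ 1
  · rw [if_pos h1]
    constructor
    · intro h; exact absurd h (by decide)
    · rintro ⟨h, -⟩; omega
  · rw [if_neg h1]
    by_cases h3 : n ≤ 3
    · rw [if_pos h3]
      have h23 : n = 2 ∨ n = 3 := by omega
      constructor
      · intro _
        rcases h23 with rfl | rfl
        · exact ⟨by norm_num, by decide⟩
        · exact ⟨by norm_num, by decide⟩
      · intro _; rfl
    · rw [if_neg h3]
      have hn4 : 4 ≤ n := by omega
      have hn4' : 4 ≤ n.toNat := by omega
      by_cases h23 : PySem.Int.mod n 2 = 0 ∨ PySem.Int.mod n 3 = 0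
      · rw [if_pos h23]
        constructor
        · intro h; exact absurd h (by decide)
        · rintro ⟨-, hp⟩
          exfalso
          rcases h23 with h | h
          · have hd : (2:Int) ∣ n := (PySem.Int.mod_eq_zero_iff_dvd n 2).mp h
            have hdN : 2 ∣ n.toNat := by
              have := (dvd_toNat_iff (by norm_num : (0:Int) ≤ 2) (by omega)).mp hd
              simpa using this
            rcases hp.eq_one_or_self_of_dvd 2 hdN with h' | h' <;> omega
          · have hd : (3:Int) ∣ n := (PySem.Int.mod_eq_zero_iff_dvd n 3).mp h
            have hdN : 3 ∣ n.toNat := by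
              have := (dvd_toNat_iff (by norm_num : (0:Int) ≤ 3) (by omega)).mp hd
              simpa using this
            rcases hp.eq_one_or_self_of_dvd 3 hdN with h' | h' <;> omega
      · rw [if_neg h23]
        push_neg at h23
        obtain ⟨hm2, hm3⟩ := h23
        have hnd2 : ¬ (2:Int) ∣ n := fun h => hm2 ((PySem.Int.mod_eq_zero_iff_dvd n 2).mpr h)
        have hnd3 : ¬ (3:Int) ∣ n := fun h => hm3 ((PySem.Int.mod_eq_zero_iff_dvd n 3).mpr h)
        have hnd2N : ¬ 2 ∣ n.toNat := fun h => hnd2 (by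
          have : ((2:Nat):Int) ∣ ((n.toNat:Nat):Int) := Int.natCast_dvd_natCast.mpr h
          rwa [Int.toNat_of_nonneg (by omega : (0:Int) ≤ n)] at this)
        have hnd3N : ¬ 3 ∣ n.toNat := fun h => hnd3 (by
          have : ((3:Nat):Int) ∣ ((n.toNat:Nat):Int) := Int.natCast_dvd_natCast.mpr h
          rwa [Int.toNat_of_nonneg (by omega : (0:Int) ≤ n)] at this)
        constructor
        · intro hloop
          refine ⟨by omega, ?_⟩
          by_contra hnp
          rw [Nat.prime_def_le_sqrt] at hnp
          push_neg at hnp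
          obtain ⟨m, hm2', hmsqrt, hmdvd⟩ := hnp (by omega)
          have hm1 : m ≠ 1 := by omega
          have hpp : Nat.Prime m.minFac := Nat.minFac_prime hm1
          have hpd : m.minFac ∣ n.toNat := (Nat.minFac_dvd m).trans hmdvd
          have hple : m.minFac ≤ m := Nat.minFac_le (by omega)
          have hmsq : m * m ≤ n.toNat := by
            have := Nat.le_sqrt'.mp hmsqrt
            nlinarith
          have hpsq : m.minFac * m.minFac ≤ n.toNat := by nlinarith
          have hpge2 : 2 ≤ m.minFac := hpp.two_le
          have hnot2 : ¬ 2 ∣ m.minFac := fun h => hnd2N (h.trans hpd)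
          have hnot3 : ¬ 3 ∣ m.minFac := fun h => hnd3N (h.trans hpd)
          have hmod : m.minFac % 6 = 1 ∨ m.minFac % 6 = 5 := by omega
          have hplen : m.minFac ≤ n.toNat := by nlinarith
          have hdInt : ((m.minFac:Nat):Int) ∣ n := by
            have : ((m.minFac:Nat):Int) ∣ ((n.toNat:Nat):Int) := Int.natCast_dvd_natCast.mpr hpd
            rwa [Int.toNat_of_nonneg (by omega : (0:Int) ≤ n)] at this
          have hsqInt : ((m.minFac:Nat):Int) * ((m.minFac:Nat):Int) ≤ n := by
            rw [← Int.toNat_of_nonneg (show (0:Int) ≤ n by omega)]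
            exact_mod_cast hpsq
          rcases hmod with hmod | hmod
          · have hp7 : 7 ≤ m.minFac := by omega
            obtain ⟨j, hj⟩ : ∃ j : Nat, m.minFac = 7 + 6 * j := ⟨(m.minFac - 7)/6, by omega⟩
            have hfalse : primeLoop (n.toNat + 1) n 5 = false := by
              rw [primeLoop_false_iff _ n 5 (by norm_num)]
              have e2 : (5 + 6 * (j:Int) + 2) = ((m.minFac:Nat):Int) := by push_cast [hj]; ring
              have e1 : (5 + 6 * (j:Int)) = ((m.minFac:Nat):Int) - 2 := by push_cast [hj]; ring
              refine ⟨j, by omega, ?_, Or.inr ?_⟩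
              · rw [e1]
                have h7 : (7:Int) ≤ ((m.minFac:Nat):Int) := by exact_mod_cast hp7
                nlinarith
              · rw [e2]; exact hdInt
            rw [hfalse] at hloop
            exact absurd hloop (by decide)
          · have hp5 : 5 ≤ m.minFac := by omega
            obtain ⟨j, hj⟩ : ∃ j : Nat, m.minFac = 5 + 6 * j := ⟨(m.minFac - 5)/6, by omega⟩
            have hfalse : primeLoop (n.toNat + 1) n 5 = false := by
              rw [primeLoop_false_iff _ n 5 (by norm_num)]
              have e1 : (5 + 6 * (j:Int)) = ((m.minFac:Nat):Int) := by push_cast [hj]; ring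
              refine ⟨j, by omega, ?_, Or.inl ?_⟩
              · rw [e1]; exact hsqInt
              · rw [e1]; exact hdInt
            rw [hfalse] at hloop
            exact absurd hloop (by decide)
        · rintro ⟨-, hp⟩
          by_contra hloop
          have hloop' : primeLoop (n.toNat + 1) n 5 = false := bool_false_of_not_true hloop
          rw [primeLoop_false_iff _ n 5 (by norm_num)] at hloop'
          obtain ⟨j, hj, hsq, hdvd⟩ := hloop'
          have hj0 : (0:Int) ≤ (j:Int) := Int.natCast_nonneg j
          rcases hdvd with hdvd | hdvd
          · have he5 : (5:Int) ≤ 5 + 6 * (j:Int) := by omega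
            have helt : 5 + 6 * (j:Int) < n := by nlinarith
            have heN : (5 + 6 * (j:Int)).toNat ∣ n.toNat :=
              (dvd_toNat_iff (by omega) (by omega)).mp hdvd
            rcases hp.eq_one_or_self_of_dvd _ heN with h' | h' <;> omega
          · have he5 : (5:Int) ≤ 5 + 6 * (j:Int) := by omega
            have helt : 5 + 6 * (j:Int) + 2 < n := by nlinarith
            have heN : (5 + 6 * (j:Int) + 2).toNat ∣ n.toNat :=
              (dvd_toNat_iff (by omega) (by omega)).mp hdvd
            rcases hp.eq_one_or_self_of_dvd _ heN with h' | h' <;> omega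

theorem loopA_spec (B A : Int) (hB : isPrime B = true) (hA : isPrime A = true) :
    ∀ (f : Nat) (b a : Int), B ≤ b → a ≤ A →
    (∀ m : Int, B < m → m ≤ b → isPrime m = false) →
    (∀ m : Int, a ≤ m → m < A → isPrime m = false) →
    (b - B).toNat + (A - a).toNat < f →
    loopA f b a = (B, A) := by
  intro f
  induction f with
  | zero => intro b a _ _ _ _ hf; exact absurd hf (Nat.not_lt_zero _)
  | succ f ih =>
    intro b a hBb haA hbet1 hbet2 hf
    cases hb : isPrime b <;> cases ha : isPrime a
    · -- both not prime
      have hbB : B < b := by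
        rcases eq_or_lt_of_le hBb with rfl | h
        · rw [hB] at hb; exact absurd hb (by decide)
        · exact h
      have haA' : a < A := by
        rcases eq_or_lt_of_le haA with rfl | h
        · rw [hA] at ha; exact absurd ha (by decide)
        · exact h
      have hstep : loopA (f+1) b a = loopA f (b-1) (a+1) := by
        simp [loopA, hb, ha]
      rw [hstep]
      exact ih (b-1) (a+1) (by omega) (by omega)
        (fun m h1 h2 => hbet1 m h1 (by omega))
        (fun m h1 h2 => hbet2 m (by omega) h2) (by omega)
    · -- b not prime, a prime
      have hbB : B < b := by
        rcases eq_or_lt_of_le hBb with rfl | h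
        · rw [hB] at hb; exact absurd hb (by decide)
        · exact h
      have hstep : loopA (f+1) b a = loopA f (b-1) a := by
        simp [loopA, hb, ha]
      rw [hstep]
      exact ih (b-1) a (by omega) haA
        (fun m h1 h2 => hbet1 m h1 (by omega)) hbet2 (by omega)
    · -- b prime, a not prime
      have haA' : a < A := by
        rcases eq_or_lt_of_le haA with rfl | h
        · rw [hA] at ha; exact absurd ha (by decide)
        · exact h
      have hstep : loopA (f+1) b a = loopA f b (a+1) := by
        simp [loopA, hb, ha]
      rw [hstep]
      exact ih b (a+1) hBb (by omega) hbet1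
        (fun m h1 h2 => hbet2 m (by omega) h2) (by omega)
    · -- both prime: b = B, a = A
      have hbB : b = B := by
        rcases eq_or_lt_of_le hBb with heq | h
        · omega
        · exact absurd hb (by rw [hbet1 b h le_rfl]; decide)
      have haA' : a = A := by
        rcases eq_or_lt_of_le haA with heq | h
        · omega
        · exact absurd ha (by rw [hbet2 a le_rfl h]; decide)
      subst hbB; subst haA'
      simp [loopA, hb, ha]

theorem mem_markLoop (d : Int) (hd : 0 < d) (hi : Int) :
    ∀ (f : Nat) (m : Int) (comp : PySem.Set Int) (n : Int),
      (hi + 1 - m).toNat < f →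
      (n ∈ markLoop f comp m hi d ↔ n ∈ comp ∨ (m ≤ n ∧ n ≤ hi ∧ d ∣ (n - m))) := by
  intro f
  induction f with
  | zero => intro m comp n hf; exact absurd hf (Nat.not_lt_zero _)
  | succ f ih =>
    intro m comp n hf
    by_cases hm : m ≤ hi
    · have hstep : markLoop (f+1) comp m hi d = markLoop f (PySem.Set.add comp m) (m+d) hi d := by
        simp [markLoop, hm]
      rw [hstep, ih (m+d) (PySem.Set.add comp m) n (by omega), PySem.Set.mem_add]
      constructor
      · rintro ((h | rfl) | ⟨h1, h2, h3⟩)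
        · exact Or.inl h
        · exact Or.inr ⟨le_rfl, hm, by simp⟩
        · refine Or.inr ⟨by omega, h2, ?_⟩
          obtain ⟨k, hk⟩ := h3
          exact ⟨k + 1, by linear_combination hk⟩
      · rintro (h | ⟨h1, h2, h3⟩)
        · exact Or.inl (Or.inl h)
        · rcases eq_or_lt_of_le h1 with rfl | hlt
          · exact Or.inl (Or.inr rfl)
          · obtain ⟨k, hk⟩ := h3
            have hk1 : 1 ≤ k := by
              by_contra hk0
              push_neg at hk0
              have hle : d * k ≤ 0 := mul_nonpos_of_nonneg_of_nonpos hd.le (by omega)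
              linarith
            have hge : d * 1 ≤ d * k := mul_le_mul_of_nonneg_left hk1 hd.le
            refine Or.inr ⟨by linarith, h2, ⟨k - 1, by linear_combination hk⟩⟩
    · have hstep : markLoop (f+1) comp m hi d = comp := by simp [markLoop, hm]
      rw [hstep]
      constructor
      · exact Or.inl
      · rintro (h | ⟨h1, h2, -⟩)
        · exact h
        · omega

theorem start_mem_iff (lo d n hi : Int) (hd : 2 ≤ d) (hsq : d * d ≤ hi) :
    (max (d * d) (lo + PySem.Int.mod (-lo) d) ≤ n ∧ n ≤ hi ∧
        d ∣ (n - max (d * d) (lo + PySem.Int.mod (-lo) d)))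
      ↔ (d ∣ n ∧ d * d ≤ n ∧ lo ≤ n ∧ n ≤ hi) := by
  have hd0 : (0:Int) < d := by omega
  have hmod0 : 0 ≤ PySem.Int.mod (-lo) d := PySem.Int.mod_nonneg (-lo) hd0
  have hmodlt : PySem.Int.mod (-lo) d < d := PySem.Int.mod_lt (-lo) hd0
  have hdvdfm : d ∣ (lo + PySem.Int.mod (-lo) d) := by
    have h := PySem.Int.floordiv_mul_add_mod (-lo) d
    exact ⟨-(PySem.Int.floordiv (-lo) d), by linear_combination h⟩
  have hdvdstart : d ∣ max (d * d) (lo + PySem.Int.mod (-lo) d) := by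
    rcases max_choice (d*d) (lo + PySem.Int.mod (-lo) d) with h | h <;> rw [h]
    · exact ⟨d, rfl⟩
    · exact hdvdfm
  constructor
  · rintro ⟨h1, h2, h3⟩
    refine ⟨?_, ?_, ?_, h2⟩
    · obtain ⟨k, hk⟩ := hdvdstart
      obtain ⟨l, hl⟩ := h3
      exact ⟨k + l, by linear_combination hk + hl⟩
    · have := le_max_left (d*d) (lo + PySem.Int.mod (-lo) d)
      linarith
    · have := le_max_right (d*d) (lo + PySem.Int.mod (-lo) d)
      linarith
  · rintro ⟨hdvdn, hsqn, hlon, hhin⟩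
    refine ⟨?_, hhin, ?_⟩
    · rw [max_le_iff]
      refine ⟨hsqn, ?_⟩
      obtain ⟨k, hk⟩ := hdvdn
      obtain ⟨c, hc⟩ := hdvdfm
      by_contra hlt
      push_neg at hlt
      have h1 : n - (lo + PySem.Int.mod (-lo) d) = d * (k - c) := by linear_combination hk - hc
      have h2 : -d < n - (lo + PySem.Int.mod (-lo) d) := by linarith
      have h3 : n - (lo + PySem.Int.mod (-lo) d) < 0 := by linarith
      have hkc : k - c ≤ -1 := by
        by_contra h
        push_neg at h
        have : 0 ≤ d * (k - c) := mul_nonneg hd0.le (by omega)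
        linarith
      have hle : d * (k - c) ≤ d * (-1) := mul_le_mul_of_nonneg_left hkc hd0.le
      have he : d * (-1) = -d := by ring
      linarith
    · obtain ⟨k, hk⟩ := hdvdn
      obtain ⟨c, hc⟩ := hdvdstart
      exact ⟨k - c, by linear_combination hk - hc⟩

theorem mem_sieveLoop (lo hi : Int) :
    ∀ (f : Nat) (d : Int) (comp : PySem.Set Int) (n : Int), 2 ≤ d →
      (hi + 1 - d).toNat < f →
      (n ∈ sieveLoop f comp d lo hi ↔
        n ∈ comp ∨ ∃ e : Int, d ≤ e ∧ e * e ≤ hi ∧ e ∣ n ∧ e * e ≤ n ∧ lo ≤ n ∧ n ≤ hi) := by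
  intro f
  induction f with
  | zero => intro d comp n hd hf; exact absurd hf (Nat.not_lt_zero _)
  | succ f ih =>
    intro d comp n hd hf
    by_cases hsq : d * d ≤ hi
    · have hdle : d ≤ hi := by nlinarith
      have hstep : sieveLoop (f+1) comp d lo hi =
          sieveLoop f (markLoop ((hi - d*d).toNat + 2) comp
            (max (d*d) (lo + PySem.Int.mod (-lo) d)) hi d) (d+1) lo hi := by
        simp [sieveLoop, hsq]
      have hfm : (hi + 1 - max (d*d) (lo + PySem.Int.mod (-lo) d)).toNat < (hi - d*d).toNat + 2 := by
        have hmaxge := le_max_left (d*d) (lo + PySem.Int.mod (-lo) d)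
        have h1 : hi + 1 - max (d*d) (lo + PySem.Int.mod (-lo) d) ≤ (hi - d*d) + 1 := by linarith
        calc (hi + 1 - max (d*d) (lo + PySem.Int.mod (-lo) d)).toNat
            ≤ ((hi - d*d) + 1).toNat := Int.toNat_le_toNat h1
          _ ≤ (hi - d*d).toNat + 1 := by
              generalize (hi - d*d) = q
              omega
          _ < (hi - d*d).toNat + 2 := by omega
      have hmark := mem_markLoop d (by omega) hi ((hi - d*d).toNat + 2)
        (max (d*d) (lo + PySem.Int.mod (-lo) d)) comp n hfm
      have h2d : 2 ≤ d + 1 := by omega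
      have hfuel2 : (hi + 1 - (d + 1)).toNat < f := by omega
      rw [hstep, ih (d+1) (markLoop ((hi - d*d).toNat + 2) comp
        (max (d*d) (lo + PySem.Int.mod (-lo) d)) hi d) n h2d hfuel2, hmark]
      constructor
      · rintro ((h | hmk) | ⟨e, he1, he2, he3, he4, he5, he6⟩)
        · exact Or.inl h
        · have hh := (start_mem_iff lo d n hi hd hsq).mp ⟨hmk.1, hmk.2.1, hmk.2.2⟩
          exact Or.inr ⟨d, le_rfl, hsq, hh.1, hh.2.1, hh.2.2.1, hh.2.2.2⟩
        · exact Or.inr ⟨e, by omega, he2, he3, he4, he5, he6⟩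
      · rintro (h | ⟨e, he1, he2, he3, he4, he5, he6⟩)
        · exact Or.inl (Or.inl h)
        · rcases eq_or_lt_of_le he1 with heq | hlt
          · subst heq
            have hh := (start_mem_iff lo d n hi hd hsq).mpr ⟨he3, he4, he5, he6⟩
            exact Or.inl (Or.inr ⟨hh.1, hh.2.1, hh.2.2⟩)
          · exact Or.inr ⟨e, by omega, he2, he3, he4, he5, he6⟩
    · have hstep : sieveLoop (f+1) comp d lo hi = comp := by simp [sieveLoop, hsq]
      rw [hstep]
      constructor
      · exact Or.inl
      · rintro (h | ⟨e, he1, he2, -⟩)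
        · exact h
        · exfalso
          have : d * d ≤ e * e := by nlinarith
          linarith

theorem smallDiv_iff (n : Int) (hn : 2 ≤ n) :
    (∃ e : Int, 2 ≤ e ∧ e ∣ n ∧ e * e ≤ n) ↔ ¬ Nat.Prime n.toNat := by
  constructor
  · rintro ⟨e, he2, hdvd, hsq⟩ hp
    have helt : e < n := by nlinarith
    have heN : e.toNat ∣ n.toNat := (dvd_toNat_iff (by omega) (by omega)).mp hdvd
    rcases hp.eq_one_or_self_of_dvd e.toNat heN with h' | h' <;> omega
  · intro hnp
    rw [Nat.prime_def_le_sqrt] at hnp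
    push_neg at hnp
    obtain ⟨m, hm2, hmsqrt, hmdvd⟩ := hnp (by omega)
    have hmm : m * m ≤ n.toNat := by
      have := Nat.le_sqrt'.mp hmsqrt
      nlinarith
    refine ⟨(m : Int), by exact_mod_cast hm2, ?_, ?_⟩
    · rw [← Int.toNat_of_nonneg (show (0:Int) ≤ n by omega)]
      exact_mod_cast hmdvd
    · rw [← Int.toNat_of_nonneg (show (0:Int) ≤ n by omega)]
      exact_mod_cast hmm

-- the sieved composite set of one window of Source B
def wcomp (x w : Int) : PySem.Set Int :=
  sieveLoop ((x + w).toNat + 1) PySem.Set.empty 2 (max 2 (x - w)) (x + w)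

theorem windowLoop_succ (f : Nat) (x w : Int) :
    windowLoop (f+1) x w =
      (if 2 ≤ x ∧ PySem.Set.contains (wcomp x w) x = false then
        PySem.Int.toStr x ++ " is prime."
      else
        match (PySem.List.pyRange (x - 1) (max 2 (x - w) - 1) (-1)).find?
                (fun n => !PySem.Set.contains (wcomp x w) n),
              (PySem.List.pyRange (x + 1) (x + w + 1) 1).find?
                (fun n => !PySem.Set.contains (wcomp x w) n) with
        | some b, some a =>
            PySem.Int.toStr b ++ " < " ++ PySem.Int.toStr x ++ " < " ++ PySem.Int.toStr a
        | _, _ => windowLoop f x (w * 2)) := rfl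

theorem contains_false_iff {s : PySem.Set Int} {n : Int} :
    PySem.Set.contains s n = false ↔ ¬ n ∈ s := by
  rw [← PySem.Set.contains_iff]
  cases PySem.Set.contains s n <;> simp

theorem contains_wcomp_false_iff (x w n : Int) (hx : 2 ≤ x) (hw : 2 ≤ w)
    (hn1 : max 2 (x - w) ≤ n) (hn2 : n ≤ x + w) :
    (PySem.Set.contains (wcomp x w) n = false) ↔ Nat.Prime n.toNat := by
  have hlo2 : (2:Int) ≤ max 2 (x - w) := le_max_left _ _
  have hn2' : 2 ≤ n := le_trans hlo2 hn1
  have hhi : (4:Int) ≤ x + w := by omega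
  have hmem := mem_sieveLoop (max 2 (x - w)) (x + w) ((x + w).toNat + 1) 2
    PySem.Set.empty n (le_refl 2) (by omega)
  rw [contains_false_iff]
  unfold wcomp
  rw [hmem]
  constructor
  · intro h
    by_contra hnp
    obtain ⟨e, he1, he3, he4⟩ := (smallDiv_iff n hn2').mpr hnp
    exact h (Or.inr ⟨e, he1, by linarith, he3, he4, hn1, hn2⟩)
  · intro hp
    rintro (h | ⟨e, he1, -, he3, he4, -, -⟩)
    · simpa [PySem.Set.empty] using h
    · exact (smallDiv_iff n hn2').mp ⟨e, he1, he3, he4⟩ hp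

theorem find?_desc (p : Int → Bool) (lo B : Int) (hB : p B = true) (hloB : lo ≤ B) :
    ∀ (k : Nat) (s : Int), s - B = (k : Int) →
      (∀ m : Int, B < m → m ≤ s → p m = false) →
      (PySem.List.pyRange s (lo - 1) (-1)).find? p = some B := by
  intro k
  induction k with
  | zero =>
    intro s hs _
    have hsB : s = B := by omega
    subst hsB
    rw [PySem.List.pyRange_neg_one_cons (by omega)]
    simp [List.find?, hB]
  | succ k ih =>
    intro s hs hnone
    have hBs : B < s := by omega
    rw [PySem.List.pyRange_neg_one_cons (by omega)]
    have hps : p s = false := hnone s hBs le_rfl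
    simp only [List.find?, hps]
    exact ih (s-1) (by omega) (fun m h1 h2 => hnone m h1 (by omega))

theorem find?_asc (p : Int → Bool) (hi A : Int) (hA : p A = true) (hAhi : A ≤ hi) :
    ∀ (k : Nat) (s : Int), A - s = (k : Int) →
      (∀ m : Int, s ≤ m → m < A → p m = false) →
      (PySem.List.pyRange s (hi + 1) 1).find? p = some A := by
  intro k
  induction k with
  | zero =>
    intro s hs _
    have hsA : s = A := by omega
    subst hsA
    rw [PySem.List.pyRange_one_cons (by omega)]
    simp [List.find?, hA]
  | succ k ih =>
    intro s hs hnone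
    have hsA : s < A := by omega
    rw [PySem.List.pyRange_one_cons (by omega)]
    have hps : p s = false := hnone s le_rfl hsA
    simp only [List.find?, hps]
    exact ih (s+1) (by omega) (fun m h1 h2 => hnone m (by omega) h2)

theorem wguard_false (x w : Int) (hx : 2 ≤ x) (hw : 2 ≤ w) (hxnp : ¬ Nat.Prime x.toNat) :
    ¬ (2 ≤ x ∧ PySem.Set.contains (wcomp x w) x = false) := by
  rintro ⟨-, hc⟩
  exact hxnp ((contains_wcomp_false_iff x w x hx hw (max_le hx (by omega)) (by omega)).mp hc)

theorem windowLoop_prime (x : Int) (hx : isPrime x = true) :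
    ∀ (f : Nat) (w : Int), 2 ≤ w →
      windowLoop (f+1) x w = PySem.Int.toStr x ++ " is prime." := by
  intro f w hw
  have hx2 : 2 ≤ x := ((isPrime_iff x).mp hx).1
  have hp : Nat.Prime x.toNat := ((isPrime_iff x).mp hx).2
  have hc : PySem.Set.contains (wcomp x w) x = false :=
    (contains_wcomp_false_iff x w x hx2 hw (max_le hx2 (by omega)) (by omega)).mpr hp
  rw [windowLoop_succ, if_pos ⟨hx2, hc⟩]

theorem wprime_iff (x w n : Int) (hx : 2 ≤ x) (hw : 2 ≤ w)
    (h1 : max 2 (x - w) ≤ n) (h2 : n ≤ x + w) :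
    ((!PySem.Set.contains (wcomp x w) n) = true ↔ Nat.Prime n.toNat) := by
  rw [Bool.not_eq_true']
  exact contains_wcomp_false_iff x w n hx hw h1 h2

theorem windowLoop_return (x B A : Int) (hx : 2 ≤ x) (hxnp : ¬ Nat.Prime x.toNat)
    (hB2 : 2 ≤ B) (hBlt : B ≤ x - 1) (hBp : Nat.Prime B.toNat)
    (hA : x + 1 ≤ A) (hAp : Nat.Prime A.toNat)
    (hBmax : ∀ m : Int, B < m → m ≤ x - 1 → ¬ Nat.Prime m.toNat)
    (hAmin : ∀ m : Int, x + 1 ≤ m → m < A → ¬ Nat.Prime m.toNat)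
    (f : Nat) (w : Int) (hw : 2 ≤ w) (hwB : x - B ≤ w) (hwA : A - x ≤ w) :
    windowLoop (f+1) x w =
      PySem.Int.toStr B ++ " < " ++ PySem.Int.toStr x ++ " < " ++ PySem.Int.toStr A := by
  have hloB : max 2 (x - w) ≤ B := max_le hB2 (by omega)
  have hAhi : A ≤ x + w := by omega
  rw [windowLoop_succ, if_neg (wguard_false x w hx hw hxnp)]
  have hfind1 : (PySem.List.pyRange (x-1) (max 2 (x - w) - 1) (-1)).find?
      (fun n => !PySem.Set.contains (wcomp x w) n) = some B := by
    apply find?_desc _ (max 2 (x - w)) B ((wprime_iff x w B hx hw hloB (by omega)).mpr hBp) hloB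
      ((x - 1 - B).toNat) (x-1) (by omega)
    intro m h1 h2
    apply bool_false_of_not_true
    intro hpm
    exact hBmax m h1 h2 ((wprime_iff x w m hx hw (by omega) (by omega)).mp hpm)
  have hfind2 : (PySem.List.pyRange (x+1) (x + w + 1) 1).find?
      (fun n => !PySem.Set.contains (wcomp x w) n) = some A := by
    apply find?_asc _ (x + w) A ((wprime_iff x w A hx hw (by omega) hAhi).mpr hAp) hAhi
      ((A - (x+1)).toNat) (x+1) (by omega)
    intro m h1 h2
    apply bool_false_of_not_true
    intro hpm
    exact hAmin m h1 h2 ((wprime_iff x w m hx hw (by omega) (by omega)).mp hpm)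
  rw [hfind1, hfind2]

theorem windowLoop_notprime (x B A : Int) (hx : 2 ≤ x)
    (hxnp : isPrime x = false)
    (hB2 : 2 ≤ B) (hBlt : B ≤ x - 1) (hBp : Nat.Prime B.toNat)
    (hA : x + 1 ≤ A) (hAp : Nat.Prime A.toNat)
    (hBmax : ∀ m : Int, B < m → m ≤ x - 1 → ¬ Nat.Prime m.toNat)
    (hAmin : ∀ m : Int, x + 1 ≤ m → m < A → ¬ Nat.Prime m.toNat) :
    ∀ (f : Nat) (w : Int), 2 ≤ w → x - B ≤ 2^f * w → A - x ≤ 2^f * w →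
      windowLoop (f+1) x w =
        PySem.Int.toStr B ++ " < " ++ PySem.Int.toStr x ++ " < " ++ PySem.Int.toStr A := by
  have hxnp' : ¬ Nat.Prime x.toNat := by
    intro hp
    have h := (isPrime_iff x).mpr ⟨hx, hp⟩
    rw [hxnp] at h
    exact absurd h (by decide)
  intro f
  induction f with
  | zero =>
    intro w hw hwB hwA
    exact windowLoop_return x B A hx hxnp' hB2 hBlt hBp hA hAp hBmax hAmin 0 w hw
      (by simpa using hwB) (by simpa using hwA)
  | succ f ih =>
    intro w hw hwB hwA
    by_cases hfit : x - B ≤ w ∧ A - x ≤ w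
    · exact windowLoop_return x B A hx hxnp' hB2 hBlt hBp hA hAp hBmax hAmin (f+1) w hw
        hfit.1 hfit.2
    · have hrec : windowLoop (f+1) x (w * 2) =
          PySem.Int.toStr B ++ " < " ++ PySem.Int.toStr x ++ " < " ++ PySem.Int.toStr A := by
        apply ih (w*2) (by omega)
        · have he : (2:Int)^(f+1) * w = 2^f * (w * 2) := by rw [pow_succ]; ring
          linarith [hwB, he.ge, he.le]
        · have he : (2:Int)^(f+1) * w = 2^f * (w * 2) := by rw [pow_succ]; ring
          linarith [hwA, he.ge, he.le]
      rw [windowLoop_succ, if_neg (wguard_false x w hx hw hxnp')]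
      rcases not_and_or.mp hfit with hbig | hbig
      · -- the prime below x lies outside the window: the descending scan finds nothing
        have hnone1 : (PySem.List.pyRange (x-1) (max 2 (x - w) - 1) (-1)).find?
            (fun n => !PySem.Set.contains (wcomp x w) n) = none := by
          rw [List.find?_eq_none]
          intro n hn hpn
          rw [PySem.List.mem_pyRange_neg_one] at hn
          have hmx := le_max_right 2 (x - w)
          have hmx2 := le_max_left 2 (x - w)
          have hwin1 : max 2 (x - w) ≤ n := by linarith [hn.1]
          have hwin2 : n ≤ x + w := by linarith [hn.2]
          have hBn : B < n := by linarith [hn.1]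
          exact hBmax n hBn (by linarith [hn.2]) ((wprime_iff x w n hx hw hwin1 hwin2).mp hpn)
        rcases h2nd : (PySem.List.pyRange (x+1) (x + w + 1) 1).find?
            (fun n => !PySem.Set.contains (wcomp x w) n) with _ | a
        · rw [hnone1]
          exact hrec
        · rw [hnone1]
          exact hrec
      · -- the prime above x lies outside the window: the ascending scan finds nothing
        have hnone2 : (PySem.List.pyRange (x+1) (x + w + 1) 1).find?
            (fun n => !PySem.Set.contains (wcomp x w) n) = none := by
          rw [List.find?_eq_none]
          intro n hn hpn
          rw [PySem.List.mem_pyRange_one] at hn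
          have hwin1 : max 2 (x - w) ≤ n := max_le (by linarith [hn.1]) (by linarith [hn.1])
          have hwin2 : n ≤ x + w := by linarith [hn.2]
          have hnA : n < A := by linarith [hn.2]
          exact hAmin n (by linarith [hn.1]) hnA ((wprime_iff x w n hx hw hwin1 hwin2).mp hpn)
        rcases h1st : (PySem.List.pyRange (x-1) (max 2 (x - w) - 1) (-1)).find?
            (fun n => !PySem.Set.contains (wcomp x w) n) with _ | b
        · rw [hnone2]
          exact hrec
        · rw [hnone2]
          exact hrec

-- ===== VERDICT (by name: the statement is the Claim_ definition above) =====
theorem easy_326_spec : Claim_equal_easy_326 := by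
  intro x hdom hpre
  unfold Spec_easy_326
  have hx2 : 2 ≤ x := hpre
  have hdom' : -2147483648 ≤ x ∧ x ≤ 2147483648 := by
    simpa [Dom_easy_326, pvDomInt] using hdom
  by_cases hp : isPrime x = true
  · have hA : easy_326 x = PySem.Int.toStr x ++ " is prime." := by
      simp [easy_326, hp]
    have hBeq : easy_326_alt x = PySem.Int.toStr x ++ " is prime." := by
      rw [show easy_326_alt x = windowLoop (63+1) x 2 from rfl]
      exact windowLoop_prime x hp 63 2 (by norm_num)
    rw [hA, hBeq]
  · have hp' : isPrime x = false := bool_false_of_not_true hp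
    have hnpx : ¬ Nat.Prime x.toNat := fun h => hp ((isPrime_iff x).mpr ⟨hx2, h⟩)
    have hx4 : 4 ≤ x := by
      rcases (by omega : x = 2 ∨ x = 3 ∨ 4 ≤ x) with rfl | rfl | h
      · exact absurd (by decide : Nat.Prime (2:Int).toNat) hnpx
      · exact absurd (by decide : Nat.Prime (3:Int).toNat) hnpx
      · exact h
    have hNx : ((x.toNat : Nat) : Int) = x := Int.toNat_of_nonneg (by omega)
    have hN4 : 4 ≤ x.toNat := by omega
    -- greatest prime below x
    have hBnp : Nat.Prime (Nat.findGreatest Nat.Prime (x.toNat - 1)) :=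
      Nat.findGreatest_spec (m := 3) (by omega) (by norm_num)
    have hBn3 : 3 ≤ Nat.findGreatest Nat.Prime (x.toNat - 1) :=
      Nat.le_findGreatest (by omega) (by norm_num)
    have hBnle : Nat.findGreatest Nat.Prime (x.toNat - 1) ≤ x.toNat - 1 :=
      Nat.findGreatest_le _
    have hBnmax : ∀ k : Nat, Nat.findGreatest Nat.Prime (x.toNat - 1) < k → k ≤ x.toNat - 1 →
        ¬ Nat.Prime k := fun k h1 h2 => Nat.findGreatest_is_greatest h1 h2
    -- least prime above x
    have hex : ∃ p : Nat, x.toNat < p ∧ Nat.Prime p := by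
      obtain ⟨p, pp, h1, h2⟩ := Nat.bertrand x.toNat (by omega)
      exact ⟨p, h1, pp⟩
    have hAnp : Nat.Prime (Nat.find hex) := (Nat.find_spec hex).2
    have hAngt : x.toNat < Nat.find hex := (Nat.find_spec hex).1
    have hAnmin : ∀ k : Nat, x.toNat < k → Nat.Prime k → Nat.find hex ≤ k :=
      fun k h1 h2 => Nat.find_min' hex ⟨h1, h2⟩
    have hAnle : Nat.find hex ≤ 2 * x.toNat := by
      obtain ⟨p, pp, h1, h2⟩ := Nat.bertrand x.toNat (by omega)
      exact le_trans (hAnmin p h1 pp) h2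
    set Bn := Nat.findGreatest Nat.Prime (x.toNat - 1) with hBndef
    set An := Nat.find hex with hAndef
    have hBmaxI : ∀ m : Int, (Bn:Int) < m → m ≤ x - 1 → ¬ Nat.Prime m.toNat := by
      intro m h1 h2 hpm
      exact hBnmax m.toNat (by omega) (by omega) hpm
    have hAminI : ∀ m : Int, x + 1 ≤ m → m < (An:Int) → ¬ Nat.Prime m.toNat := by
      intro m h1 h2 hpm
      have := hAnmin m.toNat (by omega) hpm
      omega
    have hBpI : Nat.Prime ((Bn:Int)).toNat := by simpa using hBnp
    have hApI : Nat.Prime ((An:Int)).toNat := by simpa using hAnp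
    have hiB : isPrime (Bn:Int) = true := (isPrime_iff _).mpr ⟨by omega, hBpI⟩
    have hiA : isPrime (An:Int) = true := (isPrime_iff _).mpr ⟨by omega, hApI⟩
    have hloop : loopA (2 * x.toNat + 8) (x-1) (x+1) = ((Bn:Int), (An:Int)) := by
      apply loopA_spec (Bn:Int) (An:Int) hiB hiA (2 * x.toNat + 8) (x-1) (x+1)
        (by omega) (by omega)
      · intro m h1 h2
        apply bool_false_of_not_true
        intro hm
        exact hBmaxI m h1 h2 ((isPrime_iff m).mp hm).2
      · intro m h1 h2
        apply bool_false_of_not_true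
        intro hm
        exact hAminI m h1 h2 ((isPrime_iff m).mp hm).2
      · omega
    have hAeq : easy_326 x = PySem.Int.toStr (Bn:Int) ++ " < " ++ PySem.Int.toStr x
        ++ " < " ++ PySem.Int.toStr (An:Int) := by
      simp [easy_326, hp', hloop]
    have hBeq : easy_326_alt x = PySem.Int.toStr (Bn:Int) ++ " < " ++ PySem.Int.toStr x
        ++ " < " ++ PySem.Int.toStr (An:Int) := by
      rw [show easy_326_alt x = windowLoop (63+1) x 2 from rfl]
      apply windowLoop_notprime x (Bn:Int) (An:Int) hx2 hp' (by omega) (by omega) hBpI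
        (by omega) hApI hBmaxI hAminI 63 2 (by norm_num)
      · have hpw : (2:Int)^63 * 2 = 18446744073709551616 := by norm_num
        omega
      · have hpw : (2:Int)^63 * 2 = 18446744073709551616 := by norm_num
        omega
    rw [hAeq, hBeq]
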